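-- pv_equiv track=rewrite | github.com/OthmanMohammad/multi-agent-support-system | src/agents/essential/support/account/compliance_specialist.py | _detect_compliance_action
-- ===== SOURCE A (Python) =====
-- def _detect_compliance_action(message: str) -> str:
--     msg_lower = message.lower()
--     if "gdpr" in msg_lower:
--         return "gdpr_request"
--     elif "ccpa" in msg_lower or "california" in msg_lower:
--         return "ccpa_request"
--     elif any(w in msg_lower for w in ["dpa", "data processing agreement"]):
--         return "dpa"
--     elif any(w in msg_lower for w in ["soc", "iso", "certification", "certified"]):
--         return "certifications"
--     return "overview"
-- ===== SOURCE B (Python) =====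
-- _KEYWORD_PRIORITY = {
--     "gdpr": 0,
--     "ccpa": 1, "california": 1,
--     "dpa": 2, "data processing agreement": 2,
--     "soc": 3, "iso": 3, "certification": 3, "certified": 3,
-- }
-- _ACTIONS = ["gdpr_request", "ccpa_request", "dpa", "certifications", "overview"]
--
-- def _detect_compliance_action(message: str) -> str:
--     # Single left-to-right scan over the message positions, keeping the best
--     # (lowest) priority of any keyword that starts at the current position.
--     m = message.lower()
--     best = 4
--     for i in range(len(m)):
--         for kw, p in _KEYWORD_PRIORITY.items():
--             if p < best and m.startswith(kw, i):
--                 best = p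
--     return _ACTIONS[best]
-- ===== Notes on version B (the rewrite author's own statement) =====
-- stated objective: alternative
-- what changed: Instead of A's priority cascade of whole-string substring tests, B scans the message positions once with a min-priority accumulator, checking at each position which keyword starts there and returning the action of the best priority found.
import Mathlib
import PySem

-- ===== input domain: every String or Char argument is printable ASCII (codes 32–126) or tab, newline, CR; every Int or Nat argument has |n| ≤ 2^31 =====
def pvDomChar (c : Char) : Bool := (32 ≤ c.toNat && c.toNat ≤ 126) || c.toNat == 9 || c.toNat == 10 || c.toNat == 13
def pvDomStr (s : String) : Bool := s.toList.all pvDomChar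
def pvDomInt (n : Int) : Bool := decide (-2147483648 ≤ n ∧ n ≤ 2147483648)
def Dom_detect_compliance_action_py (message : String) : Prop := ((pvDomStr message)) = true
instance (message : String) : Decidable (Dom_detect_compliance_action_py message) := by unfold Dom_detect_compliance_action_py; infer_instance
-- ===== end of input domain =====

-- B replaces A's priority cascade of whole-string substring tests by a single scan over
-- message positions keeping a min-priority accumulator (alternative algorithm, same cost).
-- ===== PORT A =====
def detect_compliance_action_py (message : String) : String :=
  let msg_lower := PySem.Str.lower message
  if PySem.Str.isIn "gdpr" msg_lower then "gdpr_request"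
  else if PySem.Str.isIn "ccpa" msg_lower || PySem.Str.isIn "california" msg_lower then "ccpa_request"
  else if ["dpa", "data processing agreement"].any (fun w => PySem.Str.isIn w msg_lower) then "dpa"
  else if ["soc", "iso", "certification", "certified"].any (fun w => PySem.Str.isIn w msg_lower) then "certifications"
  else "overview"

-- ===== PORT B =====
-- _KEYWORD_PRIORITY.items() in insertion order
def kwPriority : List (List Char × Nat) :=
  [("gdpr".toList, 0),
   ("ccpa".toList, 1), ("california".toList, 1),
   ("dpa".toList, 2), ("data processing agreement".toList, 2),
   ("soc".toList, 3), ("iso".toList, 3), ("certification".toList, 3), ("certified".toList, 3)]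

def pvActions : List String := ["gdpr_request", "ccpa_request", "dpa", "certifications", "overview"]

-- body of the inner loop: 'if p < best and m.startswith(kw, i): best = p'
-- (m.startswith(kw, i) with 0 ≤ i is exactly kw.isPrefixOf (m.drop i))
def pvStep (m : List Char) (i : Nat) (b : Nat) (kp : List Char × Nat) : Nat :=
  if kp.2 < b ∧ kp.1.isPrefixOf (m.drop i) then kp.2 else b

-- one iteration of the outer loop: the inner for-loop over _KEYWORD_PRIORITY.items()
def pvInner (m : List Char) (b : Nat) (i : Nat) : Nat :=
  kwPriority.foldl (pvStep m i) b

def detect_compliance_action_py_alt (message : String) : String :=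
  let m := (PySem.Str.lower message).toList
  -- outer loop 'for i in range(len(m))' with accumulator best, started at 4
  let best := (List.range m.length).foldl (pvInner m) 4
  -- _ACTIONS[best]: best ≤ 4 always holds, so plain indexing; getD's default is never used
  pvActions.getD best "overview"

-- ===== PRECONDITION & SPEC =====
def Spec_detect_compliance_action_py (message : String) (out : String) : Prop := out = detect_compliance_action_py_alt message
instance (message : String) (out : String) : Decidable (Spec_detect_compliance_action_py message out) := by unfold Spec_detect_compliance_action_py; infer_instance

-- ===== CLAIM (what is proved, stated in full; the proofs are below) =====
def Claim_equal_detect_compliance_action_py : Prop := ∀ (message : String), Dom_detect_compliance_action_py message → Spec_detect_compliance_action_py message (detect_compliance_action_py message)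

-- ===== LEMMAS AND PROOFS =====

-- the inner fold never increases the accumulator
lemma foldl_step_le (m : List Char) (i : Nat) (rs : List (List Char × Nat)) (b : Nat) :
    rs.foldl (pvStep m i) b ≤ b := by
  induction rs generalizing b with
  | nil => simp
  | cons kp rs ih =>
    simp only [List.foldl_cons]
    refine le_trans (ih _) ?_
    unfold pvStep; split_ifs with h
    · omega
    · exact le_refl _

lemma foldl_inner_le (m : List Char) (l : List Nat) (b : Nat) :
    l.foldl (pvInner m) b ≤ b := by
  induction l generalizing b with
  | nil => simp
  | cons i l ih =>
    simp only [List.foldl_cons]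
    exact le_trans (ih _) (foldl_step_le m i kwPriority b)

-- if the result changed, some rule of that priority matched at position i
lemma foldl_step_cases (m : List Char) (i : Nat) (rs : List (List Char × Nat)) (b : Nat) :
    rs.foldl (pvStep m i) b = b ∨
      ∃ kp ∈ rs, kp.2 = rs.foldl (pvStep m i) b ∧ kp.1 <+: m.drop i := by
  induction rs generalizing b with
  | nil => left; rfl
  | cons kp rs ih =>
    simp only [List.foldl_cons]
    by_cases h : kp.2 < b ∧ kp.1.isPrefixOf (m.drop i)
    · rcases ih (pvStep m i b kp) with h' | ⟨kp', hmem, hval, hpre⟩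
      · right; exact ⟨kp, List.mem_cons_self .., by rw [h', pvStep, if_pos h],
          List.isPrefixOf_iff_prefix.mp h.2⟩
      · right; exact ⟨kp', List.mem_cons_of_mem _ hmem, hval, hpre⟩
    · have hb : pvStep m i b kp = b := by rw [pvStep, if_neg h]
      rw [hb]
      rcases ih b with h' | ⟨kp', hmem, hval, hpre⟩
      · left; exact h'
      · right; exact ⟨kp', List.mem_cons_of_mem _ hmem, hval, hpre⟩

-- any rule matching at position i bounds the inner result
lemma foldl_step_min (m : List Char) (i : Nat) (rs : List (List Char × Nat)) (b : Nat)
    (kp : List Char × Nat) (hmem : kp ∈ rs) (hpre : kp.1 <+: m.drop i) :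
    rs.foldl (pvStep m i) b ≤ kp.2 := by
  induction rs generalizing b with
  | nil => cases hmem
  | cons kq rs ih =>
    simp only [List.foldl_cons]
    rcases List.mem_cons.mp hmem with rfl | hmem'
    · refine le_trans (foldl_step_le m i rs _) ?_
      unfold pvStep
      split_ifs with h
      · exact le_refl _
      · rcases Decidable.not_and_iff_or_not.mp h with h' | h'
        · omega
        · exact absurd (List.isPrefixOf_iff_prefix.mpr hpre) h'
    · exact ih _ hmem'

lemma outer_cases (m : List Char) (l : List Nat) (b : Nat) :
    l.foldl (pvInner m) b = b ∨
      ∃ i ∈ l, ∃ kp ∈ kwPriority, kp.2 = l.foldl (pvInner m) b ∧ kp.1 <+: m.drop i := by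
  induction l generalizing b with
  | nil => left; rfl
  | cons i l ih =>
    simp only [List.foldl_cons]
    rcases ih (pvInner m b i) with h' | ⟨i', hi', kp, hmem, hval, hpre⟩
    · rcases foldl_step_cases m i kwPriority b with h'' | ⟨kp, hmem, hval, hpre⟩
      · left; rw [h', pvInner, h'']
      · right
        exact ⟨i, List.mem_cons_self .., kp, hmem, by rw [h']; exact hval, hpre⟩
    · right; exact ⟨i', List.mem_cons_of_mem _ hi', kp, hmem, hval, hpre⟩

lemma outer_min (m : List Char) (l : List Nat) (b : Nat) (i : Nat)
    (kp : List Char × Nat) (hi : i ∈ l) (hmem : kp ∈ kwPriority) (hpre : kp.1 <+: m.drop i) :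
    l.foldl (pvInner m) b ≤ kp.2 := by
  induction l generalizing b with
  | nil => cases hi
  | cons j l ih =>
    simp only [List.foldl_cons]
    rcases List.mem_cons.mp hi with rfl | hi'
    · exact le_trans (foldl_inner_le m l _) (foldl_step_min m i kwPriority b kp hmem hpre)
    · exact ih _ hi'

-- a nonempty keyword occurring as an infix is found at some scanned position, so it bounds best
lemma best_le_of_infix (m : List Char) (kp : List Char × Nat) (hmem : kp ∈ kwPriority)
    (hne : kp.1 ≠ []) (hocc : kp.1 <:+: m) :
    (List.range m.length).foldl (pvInner m) 4 ≤ kp.2 := by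
  obtain ⟨s, t, h⟩ := hocc
  subst h
  apply outer_min _ _ 4 s.length kp _ hmem
  · rw [List.append_assoc, List.drop_left]
    exact ⟨t, rfl⟩
  · apply List.mem_range.mpr
    have : 0 < kp.1.length := List.length_pos_iff.mpr hne
    simp [List.length_append]
    omega

-- if best changed from 4, a rule of exactly that priority occurs in the message
lemma infix_of_best (m : List Char) (h : (List.range m.length).foldl (pvInner m) 4 ≠ 4) :
    ∃ kp ∈ kwPriority, kp.2 = (List.range m.length).foldl (pvInner m) 4 ∧ kp.1 <:+: m := by
  rcases outer_cases m (List.range m.length) 4 with h' | ⟨i, _, kp, hmem, hval, hpre⟩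
  · exact absurd h' h
  · exact ⟨kp, hmem, hval, hpre.isInfix.trans (List.drop_suffix i m).isInfix⟩

-- ===== VERDICT (by name: the statement is the Claim_ definition above) =====
theorem detect_compliance_action_py_spec : Claim_equal_detect_compliance_action_py := by
  intro message _
  simp only [Spec_detect_compliance_action_py, detect_compliance_action_py,
    detect_compliance_action_py_alt]
  set mlow := PySem.Str.lower message with hml
  set m := mlow.toList with hm
  set r := (List.range m.length).foldl (pvInner m) 4 with hr
  have hr4 : r ≤ 4 := foldl_inner_le m _ 4
  have occ_of : ∀ kw : String, PySem.Str.isIn kw mlow = true → kw.toList <:+: m :=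
    fun kw h => (PySem.Str.isIn_iff_infix kw mlow).mp h
  have nocc_of : ∀ kw : String, PySem.Str.isIn kw mlow = false → ¬ (kw.toList <:+: m) :=
    fun kw h hin => by rw [(PySem.Str.isIn_iff_infix kw mlow).mpr hin] at h; cases h
  split_ifs with h1 h2 h3 h4
  · -- gdpr
    have hle : r ≤ 0 := best_le_of_infix m ("gdpr".toList, 0) (by simp [kwPriority])
      (by decide) (occ_of _ h1)
    rw [Nat.le_zero.mp hle]; rfl
  · -- ccpa / california
    have hle : r ≤ 1 := by
      rcases Bool.or_eq_true_iff.mp h2 with h | h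
      · exact best_le_of_infix m ("ccpa".toList, 1) (by simp [kwPriority]) (by decide) (occ_of _ h)
      · exact best_le_of_infix m ("california".toList, 1) (by simp [kwPriority]) (by decide)
          (occ_of _ h)
    have hne0 : r ≠ 0 := by
      intro h0
      simp only [Bool.not_eq_true] at h1
      obtain ⟨kp, hmem, hval, hinf⟩ := infix_of_best m (by omega)
      simp only [kwPriority, List.mem_cons, List.not_mem_nil, or_false] at hmem
      rcases hmem with rfl|rfl|rfl|rfl|rfl|rfl|rfl|rfl|rfl <;>
        first
          | exact nocc_of _ h1 hinf
          | ((try dsimp only at hval); omega)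
    have : r = 1 := by omega
    rw [this]; rfl
  · -- dpa / data processing agreement
    simp only [List.any_cons, List.any_nil, Bool.or_false, Bool.or_eq_true_iff] at h3
    simp only [Bool.or_eq_true_iff, not_or, Bool.not_eq_true] at h1 h2
    have hle : r ≤ 2 := by
      rcases h3 with h | h
      · exact best_le_of_infix m ("dpa".toList, 2) (by simp [kwPriority]) (by decide) (occ_of _ h)
      · exact best_le_of_infix m ("data processing agreement".toList, 2) (by simp [kwPriority])
          (by decide) (occ_of _ h)
    have hge : ¬ r ≤ 1 := by
      intro hle1
      obtain ⟨kp, hmem, hval, hinf⟩ := infix_of_best m (by omega)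
      simp only [kwPriority, List.mem_cons, List.not_mem_nil, or_false] at hmem
      rcases hmem with rfl|rfl|rfl|rfl|rfl|rfl|rfl|rfl|rfl <;>
        first
          | exact nocc_of _ h1 hinf
          | exact nocc_of _ h2.1 hinf
          | exact nocc_of _ h2.2 hinf
          | ((try dsimp only at hval); omega)
    have : r = 2 := by omega
    rw [this]; rfl
  · -- soc / iso / certification / certified
    simp only [List.any_cons, List.any_nil, Bool.or_false, Bool.or_eq_true_iff] at h4
    simp only [List.any_cons, List.any_nil, Bool.or_false, Bool.or_eq_true_iff, not_or,
      Bool.not_eq_true] at h1 h2 h3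
    have hle : r ≤ 3 := by
      rcases h4 with h | h | h | h
      · exact best_le_of_infix m ("soc".toList, 3) (by simp [kwPriority]) (by decide) (occ_of _ h)
      · exact best_le_of_infix m ("iso".toList, 3) (by simp [kwPriority]) (by decide) (occ_of _ h)
      · exact best_le_of_infix m ("certification".toList, 3) (by simp [kwPriority]) (by decide)
          (occ_of _ h)
      · exact best_le_of_infix m ("certified".toList, 3) (by simp [kwPriority]) (by decide)
          (occ_of _ h)
    have hge : ¬ r ≤ 2 := by
      intro hle2
      obtain ⟨kp, hmem, hval, hinf⟩ := infix_of_best m (by omega)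
      simp only [kwPriority, List.mem_cons, List.not_mem_nil, or_false] at hmem
      rcases hmem with rfl|rfl|rfl|rfl|rfl|rfl|rfl|rfl|rfl <;>
        first
          | exact nocc_of _ h1 hinf
          | exact nocc_of _ h2.1 hinf
          | exact nocc_of _ h2.2 hinf
          | exact nocc_of _ h3.1 hinf
          | exact nocc_of _ h3.2 hinf
          | ((try dsimp only at hval); omega)
    have : r = 3 := by omega
    rw [this]; rfl
  · -- no keyword occurs
    simp only [List.any_cons, List.any_nil, Bool.or_false, Bool.or_eq_true_iff, not_or,
      Bool.not_eq_true] at h1 h2 h3 h4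
    have : r = 4 := by
      by_contra hne
      obtain ⟨kp, hmem, hval, hinf⟩ := infix_of_best m hne
      simp only [kwPriority, List.mem_cons, List.not_mem_nil, or_false] at hmem
      rcases hmem with rfl|rfl|rfl|rfl|rfl|rfl|rfl|rfl|rfl <;>
        first
          | exact nocc_of _ h1 hinf
          | exact nocc_of _ h2.1 hinf
          | exact nocc_of _ h2.2 hinf
          | exact nocc_of _ h3.1 hinf
          | exact nocc_of _ h3.2 hinf
          | exact nocc_of _ h4.1 hinf
          | exact nocc_of _ h4.2.1 hinf
          | exact nocc_of _ h4.2.2.1 hinf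
          | exact nocc_of _ h4.2.2.2 hinf
    rw [this]; rfl
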